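-- pv_equiv track=rewrite | github.com/ps074/doc-parser | parsers/chunker.py | _extract_tables_and_text
-- ===== SOURCE A (Python) =====
-- def _extract_tables_and_text(page_text: str) -> list[tuple[str, str]]:
--     """Split page text into (type, content) segments: 'table' or 'text'.
--
--     When a table is preceded by a heading or short context line (e.g. a title
--     like "## Beta Adj Exposure ($)"), that context is prepended to the table
--     so chunkers keep the title with the table data.
--     """
--     lines = page_text.split("\n")
--     segments = []
--     current_lines = []
--     in_table = False
--
--     for line in lines:
--         is_pipe = line.strip().startswith("|")
--
--         if is_pipe and not in_table:
--             # Flush text — but check if the tail is a table title/heading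
--             text = "\n".join(current_lines).strip()
--             if text:
--                 # Pull trailing heading/context lines that belong with the table
--                 text_lines = text.split("\n")
--                 table_prefix_lines = []
--                 while text_lines:
--                     candidate = text_lines[-1].strip()
--                     # A heading, bold line, or short label (< 100 chars) right
--                     # above the table is likely its title
--                     is_heading = candidate.startswith("#")
--                     is_bold = candidate.startswith("**") and candidate.endswith("**")
--                     is_short_label = 0 < len(candidate) < 100 and not candidate.startswith("|")
--                     if is_heading or is_bold or is_short_label:
--                         table_prefix_lines.insert(0, text_lines.pop())
--                     else:
--                         break
--
--                 remaining_text = "\n".join(text_lines).strip()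
--                 if remaining_text:
--                     segments.append(("text", remaining_text))
--
--                 # Prepend context to the table
--                 if table_prefix_lines:
--                     current_lines = table_prefix_lines + [line]
--                 else:
--                     current_lines = [line]
--             else:
--                 current_lines = [line]
--             in_table = True
--         elif is_pipe and in_table:
--             current_lines.append(line)
--         elif not is_pipe and in_table:
--             # End of table
--             table_text = "\n".join(current_lines).strip()
--             if table_text:
--                 segments.append(("table", table_text))
--             current_lines = [line]
--             in_table = False
--         else:
--             current_lines.append(line)
--
--     # Flush remaining
--     remaining = "\n".join(current_lines).strip()
--     if remaining:
--         segments.append(("table" if in_table else "text", remaining))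
--
--     return segments
-- ===== SOURCE B (Python) =====
-- from itertools import groupby
--
--
-- def _is_pipe(line):
--     return line.strip().startswith("|")
--
--
-- def _is_title(line):
--     c = line.strip()
--     is_heading = c.startswith("#")
--     is_bold = c.startswith("**") and c.endswith("**")
--     is_short_label = 0 < len(c) < 100 and not c.startswith("|")
--     return is_heading or is_bold or is_short_label
--
--
-- def _extract_tables_and_text(page_text: str) -> list[tuple[str, str]]:
--     blocks = [list(g) for _, g in groupby(page_text.split("\n"), key=_is_pipe)]
--     segments = []
--     carry = []  # title lines peeled off a text block, carried into the next table
--     for i, block in enumerate(blocks):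
--         if _is_pipe(block[0]):
--             content = "\n".join(carry + block).strip()
--             carry = []
--             if content:
--                 segments.append(("table", content))
--         elif i + 1 < len(blocks):
--             # text block followed by a table: peel trailing title lines into carry
--             text = "\n".join(block).strip()
--             carry = []
--             if text:
--                 text_lines = text.split("\n")
--                 popped = []
--                 while text_lines and _is_title(text_lines[-1]):
--                     popped.append(text_lines.pop())
--                 popped.reverse()
--                 carry = popped
--                 remaining = "\n".join(text_lines).strip()
--                 if remaining:
--                     segments.append(("text", remaining))
--         else:
--             text = "\n".join(block).strip()
--             if text:
--                 segments.append(("text", text))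
--     return segments
-- ===== Notes on version B (the rewrite author's own statement) =====
-- stated objective: alternative
-- what changed: B replaces A's per-line in_table state machine by first grouping the lines into maximal pipe/non-pipe runs (itertools.groupby) and then emitting one segment per block, peeling trailing title lines off a text block only when a table block follows.
import Mathlib
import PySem

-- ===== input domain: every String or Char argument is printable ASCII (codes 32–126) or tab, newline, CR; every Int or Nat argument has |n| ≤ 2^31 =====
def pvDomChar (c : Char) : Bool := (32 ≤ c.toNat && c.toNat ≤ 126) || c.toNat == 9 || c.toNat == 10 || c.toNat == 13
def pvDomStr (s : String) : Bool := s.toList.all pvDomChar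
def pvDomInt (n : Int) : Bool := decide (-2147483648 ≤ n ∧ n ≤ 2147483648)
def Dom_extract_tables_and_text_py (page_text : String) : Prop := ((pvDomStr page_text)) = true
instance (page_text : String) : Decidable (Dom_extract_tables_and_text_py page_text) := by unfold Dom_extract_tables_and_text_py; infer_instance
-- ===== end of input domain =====

-- B replaces A's per-line state machine by grouping the lines into maximal pipe/non-pipe runs
-- (itertools.groupby) and emitting one segment per block; objective: alternative decomposition,
-- same return value (similar cost).

-- ===== PORT A =====
-- A's inner while loop: pop trailing heading/bold/short-label lines, prefix.insert(0, pop())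
def pvPeelA (text_lines : List (List Char)) (pref : List (List Char)) :
    List (List Char) × List (List Char) :=
  if h : text_lines = [] then (text_lines, pref)
  else
    let candidate := PySem.Chars.strip (text_lines.getLast h)
    let is_heading := PySem.Chars.startswith candidate ['#']
    let is_bold := PySem.Chars.startswith candidate ['*','*'] && PySem.Chars.endswith candidate ['*','*']
    let is_short_label := (decide (0 < PySem.Chars.len candidate) && decide (PySem.Chars.len candidate < 100))
        && !PySem.Chars.startswith candidate ['|']
    if is_heading || is_bold || is_short_label then
      pvPeelA text_lines.dropLast (text_lines.getLast h :: pref)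
    else (text_lines, pref)
termination_by text_lines.length
decreasing_by
  have := List.length_pos_of_ne_nil h
  simp [List.length_dropLast]; omega

-- one iteration of A's for loop; state = (segments, current_lines, in_table)
def pvStepA (st : List (String × String) × List (List Char) × Bool) (line : List Char) :
    List (String × String) × List (List Char) × Bool :=
  let segments := st.1
  let current_lines := st.2.1
  let in_table := st.2.2
  let is_pipe := PySem.Chars.startswith (PySem.Chars.strip line) ['|']
  if is_pipe && !in_table then
    let text := PySem.Chars.strip (PySem.Chars.join ['\n'] current_lines)
    if text ≠ [] then
      let text_lines := PySem.Chars.splitOn text ['\n']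
      let r := pvPeelA text_lines []
      let remaining_text := PySem.Chars.strip (PySem.Chars.join ['\n'] r.1)
      let segments := if remaining_text ≠ [] then segments ++ [("text", String.ofList remaining_text)] else segments
      let current_lines := if r.2 ≠ [] then r.2 ++ [line] else [line]
      (segments, current_lines, true)
    else
      (segments, [line], true)
  else if is_pipe && in_table then
    (segments, current_lines ++ [line], in_table)
  else if !is_pipe && in_table then
    let table_text := PySem.Chars.strip (PySem.Chars.join ['\n'] current_lines)
    let segments := if table_text ≠ [] then segments ++ [("table", String.ofList table_text)] else segments
    (segments, [line], false)
  else
    (segments, current_lines ++ [line], in_table)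

def extract_tables_and_text_py (page_text : String) : List (String × String) :=
  let lines := PySem.Chars.splitOn page_text.toList ['\n']
  let st := lines.foldl pvStepA ([], ([], false))
  let remaining := PySem.Chars.strip (PySem.Chars.join ['\n'] st.2.1)
  if remaining ≠ [] then
    st.1 ++ [((if st.2.2 then "table" else "text"), String.ofList remaining)]
  else st.1

-- ===== PORT B =====
def pvIsPipe (line : List Char) : Bool :=
  PySem.Chars.startswith (PySem.Chars.strip line) ['|']

def pvIsTitle (line : List Char) : Bool :=
  let c := PySem.Chars.strip line
  let is_heading := PySem.Chars.startswith c ['#']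
  let is_bold := PySem.Chars.startswith c ['*','*'] && PySem.Chars.endswith c ['*','*']
  let is_short_label := (decide (0 < PySem.Chars.len c) && decide (PySem.Chars.len c < 100))
      && !PySem.Chars.startswith c ['|']
  is_heading || is_bold || is_short_label

-- itertools.groupby(lines, key=_is_pipe): maximal runs of lines with equal key
def pvGroup : List (List Char) → List (List (List Char))
  | [] => []
  | l :: ls =>
    (l :: (ls.span (fun x => pvIsPipe x == pvIsPipe l)).1)
      :: pvGroup ((ls.span (fun x => pvIsPipe x == pvIsPipe l)).2)
termination_by ls => ls.length
decreasing_by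
  have := List.length_dropWhile_le (fun x => pvIsPipe x == pvIsPipe l) ls
  simp [List.span_eq_takeWhile_dropWhile]; omega

-- B's while loop: pop trailing title lines, popped.append(pop()), reversed afterwards
def pvPeelB (text_lines popped : List (List Char)) :
    List (List Char) × List (List Char) :=
  if h : text_lines = [] then (text_lines, popped)
  else if pvIsTitle (text_lines.getLast h) then
    pvPeelB text_lines.dropLast (popped ++ [text_lines.getLast h])
  else (text_lines, popped)
termination_by text_lines.length
decreasing_by
  have := List.length_pos_of_ne_nil h
  simp [List.length_dropLast]; omega

-- B's for loop over the blocks; 'rest ≠ []' is python's 'i + 1 < len(blocks)'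
def pvGoB (segments : List (String × String)) (carry : List (List Char)) :
    List (List (List Char)) → List (String × String)
  | [] => segments
  | block :: rest =>
    if pvIsPipe (block.headD []) then
      let content := PySem.Chars.strip (PySem.Chars.join ['\n'] (carry ++ block))
      pvGoB (if content ≠ [] then segments ++ [("table", String.ofList content)] else segments) [] rest
    else if rest ≠ [] then
      let text := PySem.Chars.strip (PySem.Chars.join ['\n'] block)
      if text ≠ [] then
        let r := pvPeelB (PySem.Chars.splitOn text ['\n']) []
        let remaining := PySem.Chars.strip (PySem.Chars.join ['\n'] r.1)
        pvGoB (if remaining ≠ [] then segments ++ [("text", String.ofList remaining)] else segments)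
          r.2.reverse rest
      else pvGoB segments [] rest
    else
      let text := PySem.Chars.strip (PySem.Chars.join ['\n'] block)
      pvGoB (if text ≠ [] then segments ++ [("text", String.ofList text)] else segments) carry rest

def extract_tables_and_text_py_alt (page_text : String) : List (String × String) :=
  pvGoB [] [] (pvGroup (PySem.Chars.splitOn page_text.toList ['\n']))

-- ===== PRECONDITION & SPEC =====
def Spec_extract_tables_and_text_py (page_text : String) (out : List (String × String)) : Prop := out = extract_tables_and_text_py_alt page_text
instance (page_text : String) (out : List (String × String)) : Decidable (Spec_extract_tables_and_text_py page_text out) := by unfold Spec_extract_tables_and_text_py; infer_instance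

-- ===== CLAIM (what is proved, stated in full; the proofs are below) =====
def Claim_equal_extract_tables_and_text_py : Prop := ∀ (page_text : String), Dom_extract_tables_and_text_py page_text → Spec_extract_tables_and_text_py page_text (extract_tables_and_text_py page_text)

-- ===== LEMMAS AND PROOFS =====

-- proof-side abbreviations for the two flush computations shared by both ports
def pvTableEmit (cur : List (List Char)) : List (String × String) :=
  let t := PySem.Chars.strip (PySem.Chars.join ['\n'] cur)
  if t ≠ [] then [("table", String.ofList t)] else []

def pvTF (segs : List (String × String)) (cur : List (List Char)) :
    List (String × String) × List (List Char) :=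
  let text := PySem.Chars.strip (PySem.Chars.join ['\n'] cur)
  if text ≠ [] then
    let r := pvPeelB (PySem.Chars.splitOn text ['\n']) []
    let remaining := PySem.Chars.strip (PySem.Chars.join ['\n'] r.1)
    ((if remaining ≠ [] then segs ++ [("text", String.ofList remaining)] else segs), r.2.reverse)
  else (segs, [])

def pvFinalA (st : List (String × String) × List (List Char) × Bool) : List (String × String) :=
  let remaining := PySem.Chars.strip (PySem.Chars.join ['\n'] st.2.1)
  if remaining ≠ [] then
    st.1 ++ [((if st.2.2 then "table" else "text"), String.ofList remaining)]
  else st.1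

-- alternating nonempty homogeneous runs, first run keyed p
def GoodB : Bool → List (List (List Char)) → Prop
  | _, [] => True
  | p, b :: rest => b ≠ [] ∧ (∀ l ∈ b, pvIsPipe l = p) ∧ GoodB (!p) rest


lemma peelA_eq (tl pre : List (List Char)) :
    pvPeelA tl pre = if h : tl = [] then (tl, pre)
      else if pvIsTitle (tl.getLast h) then pvPeelA tl.dropLast (tl.getLast h :: pre)
      else (tl, pre) := by
  rw [pvPeelA]; rfl

lemma peelB_eq (tl acc : List (List Char)) :
    pvPeelB tl acc = if h : tl = [] then (tl, acc)
      else if pvIsTitle (tl.getLast h) then pvPeelB tl.dropLast (acc ++ [tl.getLast h])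
      else (tl, acc) := by
  rw [pvPeelB]

lemma peelA_shift_aux : ∀ (n : Nat) (tl pre : List (List Char)), tl.length ≤ n →
    pvPeelA tl pre = ((pvPeelA tl []).1, (pvPeelA tl []).2 ++ pre) := by
  intro n
  induction n with
  | zero =>
    intro tl pre hle
    have htl : tl = [] := List.eq_nil_of_length_eq_zero (Nat.le_zero.mp hle)
    subst htl
    rw [peelA_eq, peelA_eq]; simp
  | succ n ih =>
    intro tl pre hle
    by_cases htl : tl = []
    · subst htl; rw [peelA_eq, peelA_eq]; simp
    · rw [peelA_eq tl pre, peelA_eq tl []]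
      simp only [htl, dite_false]
      by_cases hc : pvIsTitle (tl.getLast htl) = true
      · simp only [hc, if_true]
        have hlen : tl.dropLast.length ≤ n := by
          have := List.length_pos_of_ne_nil htl
          simp [List.length_dropLast]; omega
        rw [ih tl.dropLast (tl.getLast htl :: pre) hlen,
            ih tl.dropLast [tl.getLast htl] hlen]
        simp
      · simp only [Bool.not_eq_true] at hc
        simp [hc]

lemma peelA_shift (tl pre : List (List Char)) :
    pvPeelA tl pre = ((pvPeelA tl []).1, (pvPeelA tl []).2 ++ pre) :=
  peelA_shift_aux tl.length tl pre le_rfl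

lemma peelB_shift_aux : ∀ (n : Nat) (tl acc : List (List Char)), tl.length ≤ n →
    pvPeelB tl acc = ((pvPeelB tl []).1, acc ++ (pvPeelB tl []).2) := by
  intro n
  induction n with
  | zero =>
    intro tl acc hle
    have htl : tl = [] := List.eq_nil_of_length_eq_zero (Nat.le_zero.mp hle)
    subst htl
    rw [peelB_eq, peelB_eq]; simp
  | succ n ih =>
    intro tl acc hle
    by_cases htl : tl = []
    · subst htl; rw [peelB_eq, peelB_eq]; simp
    · rw [peelB_eq tl acc, peelB_eq tl []]
      simp only [htl, dite_false]
      by_cases hc : pvIsTitle (tl.getLast htl) = true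
      · simp only [hc, if_true]
        have hlen : tl.dropLast.length ≤ n := by
          have := List.length_pos_of_ne_nil htl
          simp [List.length_dropLast]; omega
        rw [ih tl.dropLast (acc ++ [tl.getLast htl]) hlen,
            ih tl.dropLast ([] ++ [tl.getLast htl]) hlen]
        simp
      · simp only [Bool.not_eq_true] at hc
        simp [hc]

lemma peelB_shift (tl acc : List (List Char)) :
    pvPeelB tl acc = ((pvPeelB tl []).1, acc ++ (pvPeelB tl []).2) :=
  peelB_shift_aux tl.length tl acc le_rfl

lemma peelAB_aux : ∀ (n : Nat) (tl : List (List Char)), tl.length ≤ n →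
    pvPeelA tl [] = ((pvPeelB tl []).1, (pvPeelB tl []).2.reverse) := by
  intro n
  induction n with
  | zero =>
    intro tl hle
    have htl : tl = [] := List.eq_nil_of_length_eq_zero (Nat.le_zero.mp hle)
    subst htl
    rw [peelA_eq, peelB_eq]; simp
  | succ n ih =>
    intro tl hle
    by_cases htl : tl = []
    · subst htl; rw [peelA_eq, peelB_eq]; simp
    · rw [peelA_eq tl [], peelB_eq tl []]
      simp only [htl, dite_false]
      by_cases hc : pvIsTitle (tl.getLast htl) = true
      · simp only [hc, if_true]
        have hlen : tl.dropLast.length ≤ n := by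
          have := List.length_pos_of_ne_nil htl
          simp [List.length_dropLast]; omega
        rw [peelA_shift, peelB_shift, ih tl.dropLast hlen]
        simp
      · simp only [Bool.not_eq_true] at hc
        simp [hc]

lemma peelAB (tl : List (List Char)) :
    pvPeelA tl [] = ((pvPeelB tl []).1, (pvPeelB tl []).2.reverse) :=
  peelAB_aux tl.length tl le_rfl

lemma stepA_text {l : List Char} (h : pvIsPipe l = false) (segs : List (String × String))
    (cur : List (List Char)) :
    pvStepA (segs, cur, false) l = (segs, cur ++ [l], false) := by
  have h' : PySem.Chars.startswith (PySem.Chars.strip l) ['|'] = false := h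
  simp [pvStepA, h']

lemma stepA_text_end {l : List Char} (h : pvIsPipe l = false) (segs : List (String × String))
    (cur : List (List Char)) :
    pvStepA (segs, cur, true) l = (segs ++ pvTableEmit cur, [l], false) := by
  have h' : PySem.Chars.startswith (PySem.Chars.strip l) ['|'] = false := h
  simp only [pvStepA, pvTableEmit, h']
  split_ifs <;> simp_all

lemma stepA_pipe_in {l : List Char} (h : pvIsPipe l = true) (segs : List (String × String))
    (cur : List (List Char)) :
    pvStepA (segs, cur, true) l = (segs, cur ++ [l], true) := by
  have h' : PySem.Chars.startswith (PySem.Chars.strip l) ['|'] = true := h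
  simp [pvStepA, h']

lemma stepA_pipe_first {l : List Char} (h : pvIsPipe l = true) (segs : List (String × String))
    (cur : List (List Char)) :
    pvStepA (segs, cur, false) l = ((pvTF segs cur).1, (pvTF segs cur).2 ++ [l], true) := by
  have h' : PySem.Chars.startswith (PySem.Chars.strip l) ['|'] = true := h
  simp only [pvStepA, pvTF, h', peelAB]
  split_ifs <;> simp_all

lemma foldl_run_text : ∀ (b : List (List Char)), (∀ l ∈ b, pvIsPipe l = false) →
    ∀ (segs : List (String × String)) (cur : List (List Char)),
    b.foldl pvStepA (segs, cur, false) = (segs, cur ++ b, false) := by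
  intro b
  induction b with
  | nil => intro _ segs cur; simp
  | cons a b ih =>
    intro h segs cur
    simp only [List.foldl_cons]
    rw [stepA_text (h a (by simp)) segs cur]
    rw [ih (fun l hl => h l (by simp [hl])) segs (cur ++ [a])]
    simp

lemma foldl_run_pipe : ∀ (b : List (List Char)), (∀ l ∈ b, pvIsPipe l = true) →
    ∀ (segs : List (String × String)) (cur : List (List Char)),
    b.foldl pvStepA (segs, cur, true) = (segs, cur ++ b, true) := by
  intro b
  induction b with
  | nil => intro _ segs cur; simp
  | cons a b ih =>
    intro h segs cur
    simp only [List.foldl_cons]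
    rw [stepA_pipe_in (h a (by simp)) segs cur]
    rw [ih (fun l hl => h l (by simp [hl])) segs (cur ++ [a])]
    simp

lemma pvGroup_cons (l : List Char) (ls : List (List Char)) :
    pvGroup (l :: ls) = (l :: (ls.span (fun x => pvIsPipe x == pvIsPipe l)).1)
      :: pvGroup ((ls.span (fun x => pvIsPipe x == pvIsPipe l)).2) := by
  rw [pvGroup]

lemma pvGroup_nil : pvGroup [] = [] := by
  rw [pvGroup.eq_def]

lemma pvGoB_nil (segments : List (String × String)) (carry : List (List Char)) :
    pvGoB segments carry [] = segments := rfl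

lemma flatten_pvGroup_aux : ∀ (n : Nat) (ls : List (List Char)), ls.length ≤ n →
    (pvGroup ls).flatten = ls := by
  intro n
  induction n with
  | zero =>
    intro ls hle
    have : ls = [] := List.eq_nil_of_length_eq_zero (Nat.le_zero.mp hle)
    subst this; rw [pvGroup]; rfl
  | succ n ih =>
    intro ls hle
    match ls with
    | [] => rw [pvGroup]; rfl
    | l :: ls' =>
      rw [pvGroup_cons]
      simp only [List.span_eq_takeWhile_dropWhile, List.flatten_cons]
      have hlen : (ls'.dropWhile (fun x => pvIsPipe x == pvIsPipe l)).length ≤ n := by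
        have := List.length_dropWhile_le (fun x => pvIsPipe x == pvIsPipe l) ls'
        simp at hle; omega
      rw [ih _ hlen]
      simp [List.takeWhile_append_dropWhile]

lemma flatten_pvGroup (ls : List (List Char)) : (pvGroup ls).flatten = ls :=
  flatten_pvGroup_aux ls.length ls le_rfl

lemma good_pvGroup_aux : ∀ (n : Nat) (l : List Char) (ls : List (List Char)), ls.length ≤ n →
    GoodB (pvIsPipe l) (pvGroup (l :: ls)) := by
  intro n
  induction n with
  | zero =>
    intro l ls hle
    have : ls = [] := List.eq_nil_of_length_eq_zero (Nat.le_zero.mp hle)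
    subst this
    rw [pvGroup_cons]
    simp only [List.span_eq_takeWhile_dropWhile, List.takeWhile_nil, List.dropWhile_nil,
      pvGroup_nil]
    refine ⟨by simp, ?_, trivial⟩
    intro x hx
    simp at hx
    subst hx
    rfl
  | succ n ih =>
    intro l ls hle
    rw [pvGroup_cons]
    simp only [List.span_eq_takeWhile_dropWhile]
    refine ⟨by simp, ?_, ?_⟩
    · intro x hx
      rcases List.mem_cons.mp hx with h | h
      · simp [h]
      · have := List.mem_takeWhile_imp h
        simpa using this
    · rcases hdw : ls.dropWhile (fun x => pvIsPipe x == pvIsPipe l) with _ | ⟨d, ds⟩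
      · rw [pvGroup_nil]; trivial
      · have hne : ls.dropWhile (fun x => pvIsPipe x == pvIsPipe l) ≠ [] := by simp [hdw]
        have hd0 := List.head_dropWhile_not (fun x => pvIsPipe x == pvIsPipe l) hne
        simp only [hdw, List.head_cons] at hd0
        have hdp : pvIsPipe d = !pvIsPipe l := by
          simp at hd0
          cases hpl : pvIsPipe l <;> cases hpd : pvIsPipe d <;> simp_all
        have hlen : ds.length ≤ n := by
          have h1 := List.length_dropWhile_le (fun x => pvIsPipe x == pvIsPipe l) ls
          rw [hdw] at h1; simp at h1 hle; omega
        have := ih d ds hlen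
        rw [hdp] at this
        exact this

lemma good_pvGroup (l : List Char) (ls : List (List Char)) :
    GoodB (pvIsPipe l) (pvGroup (l :: ls)) :=
  good_pvGroup_aux ls.length l ls le_rfl

lemma finalA_true (segs : List (String × String)) (cur : List (List Char)) :
    pvFinalA (segs, cur, true) = segs ++ pvTableEmit cur := by
  simp only [pvFinalA, pvTableEmit]
  split <;> simp

lemma goB_pipe {l0 : List Char} (h : pvIsPipe l0 = true) (segs : List (String × String))
    (carry bt : List (List Char)) (rest : List (List (List Char))) :
    pvGoB segs carry ((l0 :: bt) :: rest)
      = pvGoB (segs ++ pvTableEmit (carry ++ (l0 :: bt))) [] rest := by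
  rw [pvGoB]
  simp only [List.headD_cons, h, if_true, pvTableEmit]
  congr 1
  split <;> simp

lemma goB_text_mid {l0 : List Char} (h : pvIsPipe l0 = false) (segs : List (String × String))
    (carry bt : List (List Char)) (rest : List (List (List Char))) (hrest : rest ≠ []) :
    pvGoB segs carry ((l0 :: bt) :: rest)
      = pvGoB (pvTF segs (l0 :: bt)).1 (pvTF segs (l0 :: bt)).2 rest := by
  rw [pvGoB]
  simp only [List.headD_cons, h, Bool.false_eq_true, if_false]
  rw [if_pos hrest]
  by_cases ht : PySem.Chars.strip (PySem.Chars.join ['\n'] (l0 :: bt)) = []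
  · simp [pvTF, ht]
  · simp [pvTF, ht]

lemma goB_text_last {l0 : List Char} (h : pvIsPipe l0 = false) (segs : List (String × String))
    (carry bt : List (List Char)) :
    pvGoB segs carry [l0 :: bt]
      = pvFinalA (segs, l0 :: bt, false) := by
  rw [pvGoB]
  simp only [List.headD_cons, h, Bool.false_eq_true, if_false]
  rw [if_neg (fun hh : ([] : List (List (List Char))) ≠ [] => hh rfl)]
  simp [pvGoB_nil, pvFinalA]

lemma pvMain : ∀ (blocks : List (List (List Char))) (p : Bool) (segs : List (String × String))
    (cur : List (List Char)) (tbl : Bool) (bsegs : List (String × String)) (carry : List (List Char)),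
    GoodB p blocks →
    (p = true → tbl = false ∧ bsegs = (pvTF segs cur).1 ∧ carry = (pvTF segs cur).2 ∧ blocks ≠ []) →
    (p = false → ((tbl = false → cur = [] ∧ bsegs = segs) ∧ (tbl = true → bsegs = segs ++ pvTableEmit cur))) →
    pvFinalA (blocks.flatten.foldl pvStepA (segs, cur, tbl)) = pvGoB bsegs carry blocks := by
  intro blocks
  induction blocks with
  | nil =>
    intro p segs cur tbl bsegs carry _ hp hf
    simp only [List.flatten_nil, List.foldl_nil]
    cases p
    · obtain ⟨h1, h2⟩ := hf rfl
      cases tbl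
      · obtain ⟨hc, hb⟩ := h1 rfl
        subst hc hb
        simp [pvGoB_nil, pvFinalA, show PySem.Chars.strip ([] : List Char) = [] from rfl]
      · rw [finalA_true, h2 rfl, pvGoB_nil]
    · exact absurd rfl (hp rfl).2.2.2
  | cons b rest ih =>
    intro p segs cur tbl bsegs carry hg hp hf
    obtain ⟨hbne, hkey, hrest⟩ := hg
    obtain ⟨l0, bt, rfl⟩ := List.exists_cons_of_ne_nil hbne
    have hl0 := hkey l0 (by simp)
    cases p
    · -- text block
      obtain ⟨h1, h2⟩ := hf rfl
      have hstep : pvStepA (segs, cur, tbl) l0 = (bsegs, [l0], false) := by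
        cases tbl
        · obtain ⟨hc, hb⟩ := h1 rfl
          subst hc hb
          rw [stepA_text hl0]; rfl
        · rw [stepA_text_end hl0, h2 rfl]
      simp only [List.flatten_cons, List.foldl_append, List.foldl_cons, hstep]
      rw [foldl_run_text bt (fun l hl => hkey l (by simp [hl])) bsegs [l0]]
      simp only [List.singleton_append]
      cases rest with
      | nil =>
        simp only [List.flatten_nil, List.foldl_nil]
        rw [goB_text_last hl0]
      | cons r rs =>
        rw [ih true bsegs (l0 :: bt) false (pvTF bsegs (l0 :: bt)).1 (pvTF bsegs (l0 :: bt)).2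
          (by simpa using hrest) (fun _ => ⟨rfl, rfl, rfl, by simp⟩) (by simp)]
        rw [goB_text_mid hl0 bsegs carry bt (r :: rs) (by simp)]
    · -- pipe block
      obtain ⟨htbl, hbs, hcar, _⟩ := hp rfl
      subst htbl
      simp only [List.flatten_cons, List.foldl_append, List.foldl_cons]
      rw [stepA_pipe_first hl0]
      rw [foldl_run_pipe bt (fun l hl => hkey l (by simp [hl]))]
      rw [ih false (pvTF segs cur).1 ((pvTF segs cur).2 ++ [l0] ++ bt) true
        ((pvTF segs cur).1 ++ pvTableEmit ((pvTF segs cur).2 ++ [l0] ++ bt)) []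
        (by simpa using hrest) (by simp) (fun _ => ⟨by simp, fun _ => rfl⟩)]
      rw [goB_pipe hl0]
      rw [hbs, hcar]
      simp

-- ===== VERDICT (by name: the statement is the Claim_ definition above) =====
theorem extract_tables_and_text_py_spec : Claim_equal_extract_tables_and_text_py := by
  intro page_text _
  unfold Spec_extract_tables_and_text_py extract_tables_and_text_py extract_tables_and_text_py_alt
  show pvFinalA ((PySem.Chars.splitOn page_text.toList ['\n']).foldl pvStepA ([], ([], false)))
      = pvGoB [] [] (pvGroup (PySem.Chars.splitOn page_text.toList ['\n']))
  rcases hl : PySem.Chars.splitOn page_text.toList ['\n'] with _ | ⟨l, ls⟩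
  · rw [pvGroup_nil]
    simp [pvGoB_nil, pvFinalA, show PySem.Chars.strip ([] : List Char) = [] from rfl]
  · have := pvMain (pvGroup (l :: ls)) (pvIsPipe l) [] [] false [] [] (good_pvGroup l ls)
      (fun _ => ⟨rfl, rfl, rfl, by rw [pvGroup_cons]; simp⟩) (fun _ => ⟨fun _ => ⟨rfl, rfl⟩, fun h => by cases h⟩)
    rw [flatten_pvGroup] at this
    exact this
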